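-- pv_equiv track=rewrite | github.com/steidani/s2s-ai-challenge-kit-eth-ubern | notebooks/old_approaches/helper_functions.py | replace_unavailable_dates
-- ===== SOURCE A (Python) =====
-- def replace_unavailable_dates(date_list):
--     #in december of all years: 17, 24, 31 are missing, but 18,25 dec and 1 jan of the following year exist (except for 2017)
--     date_list = [d.replace('12-17', '12-18') for d in date_list]
--     date_list = [d.replace('12-24', '12-25') for d in date_list]
--     #date_list = [d.replace('12-31', '01-01') for d in date_list] #year has to change as well
--     replacements = {'2000-12-31':'2001-01-01','2001-12-31':'2002-01-01','2002-12-31':'2003-01-01','2003-12-31':'2004-01-01',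
--                     '2004-12-31':'2005-01-01','2005-12-31':'2006-01-01','2006-12-31':'2007-01-01','2007-12-31':'2008-01-01',
--                     '2008-12-31':'2009-01-01','2009-12-31':'2010-01-01','2010-12-31':'2011-01-01','2011-12-31':'2012-01-01',
--                     '2012-12-31':'2013-01-01','2013-12-31':'2014-01-01','2014-12-31':'2015-01-01','2015-12-31':'2016-01-01',
--                     '2016-12-31':'2017-01-01'}
--     replacer = replacements.get  # For faster gets.
--     date_list = [replacer(d,d) for d in date_list]
--
--     #more missing values for in jan and feb 2017:
--     replacements = {'2017-01-02':'2017-01-04','2017-01-09':'2017-01-08','2017-01-16':'2017-01-15','2017-01-23':'2017-01-22',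
--                     '2017-01-30':'2017-01-29','2017-02-06':'2017-02-05','2017-02-13':'2017-02-12','2017-02-20':'2017-02-19',
--                     '2017-02-27':'2017-02-26'}
--     replacer = replacements.get  # For faster gets.
--     date_list = [replacer(d,d) for d in date_list]
--
--     #drop dates that are not available: everything after 2017-12-10
--     date_list = [d for d in date_list if '2018' not in d]
--     date_list = [d for d in date_list if '2019' not in d]
--     date_list = [d for d in date_list if d not in ['2017-12-18','2017-12-25','2017-12-31']]
--     ##also interesting: https://stackoverflow.com/questions/18819606/python-remove-a-set-of-a-list-from-another-list
--     return date_list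
-- ===== SOURCE B (Python) =====
-- def replace_unavailable_dates(date_list):
--     dec31 = {'2000-12-31':'2001-01-01','2001-12-31':'2002-01-01','2002-12-31':'2003-01-01','2003-12-31':'2004-01-01',
--              '2004-12-31':'2005-01-01','2005-12-31':'2006-01-01','2006-12-31':'2007-01-01','2007-12-31':'2008-01-01',
--              '2008-12-31':'2009-01-01','2009-12-31':'2010-01-01','2010-12-31':'2011-01-01','2011-12-31':'2012-01-01',
--              '2012-12-31':'2013-01-01','2013-12-31':'2014-01-01','2014-12-31':'2015-01-01','2015-12-31':'2016-01-01',
--              '2016-12-31':'2017-01-01'}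
--     janfeb = {'2017-01-02':'2017-01-04','2017-01-09':'2017-01-08','2017-01-16':'2017-01-15','2017-01-23':'2017-01-22',
--               '2017-01-30':'2017-01-29','2017-02-06':'2017-02-05','2017-02-13':'2017-02-12','2017-02-20':'2017-02-19',
--               '2017-02-27':'2017-02-26'}
--     dropped = ('2017-12-18', '2017-12-25', '2017-12-31')
--
--     def fix_december(d):
--         # one left-to-right scan rewriting both '12-17'->'12-18' and '12-24'->'12-25';
--         # correct because the two patterns cannot overlap and neither rewrite can
--         # create or destroy a match of the other (only a '7' turns into an '8').
--         out = []
--         i = 0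
--         n = len(d)
--         while i < n:
--             seg = d[i:i+5]
--             if seg == '12-17':
--                 out.append('12-18')
--                 i += 5
--             elif seg == '12-24':
--                 out.append('12-25')
--                 i += 5
--             else:
--                 out.append(d[i])
--                 i += 1
--         return ''.join(out)
--
--     result = []
--     for d in date_list:
--         s = fix_december(d)
--         s = dec31.get(s, s)
--         s = janfeb.get(s, s)
--         if '2018' not in s and '2019' not in s and s not in dropped:
--             result.append(s)
--     return result
-- ===== Notes on version B (the rewrite author's own statement) =====
-- stated objective: alternative
-- what changed: Replaces A's seven separate list passes and its two library str.replace scans per string with ONE pass over the list whose per-date transform is a hand-written left-to-right character scanner that performs both December rewrites in a single scan (correct because the patterns '12-17' and '12-24' cannot overlap and the rewrites cannot create or destroy a match of the other), followed by the two dict lookups and the fused drop test.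
import Mathlib
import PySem

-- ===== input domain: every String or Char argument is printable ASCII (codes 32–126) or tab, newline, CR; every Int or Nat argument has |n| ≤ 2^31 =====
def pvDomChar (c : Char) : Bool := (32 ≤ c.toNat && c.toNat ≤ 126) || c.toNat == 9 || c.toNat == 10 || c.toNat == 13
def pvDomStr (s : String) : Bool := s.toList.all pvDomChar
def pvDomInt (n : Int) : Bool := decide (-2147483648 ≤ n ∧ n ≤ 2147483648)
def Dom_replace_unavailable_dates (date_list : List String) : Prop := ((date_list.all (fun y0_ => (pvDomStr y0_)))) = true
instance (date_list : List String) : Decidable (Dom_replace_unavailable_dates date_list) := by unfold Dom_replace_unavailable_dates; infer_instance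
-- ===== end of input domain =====

-- B replaces A's seven list passes and two str.replace scans by ONE pass over the list
-- whose per-date transform is a hand-written left-to-right character scanner doing
-- both December rewrites at once; objective: alternative (same O(n) cost).


-- shared literal constants (the same dict literals appear in both Pythons)
def dec31Replacements : PySem.Dict String String := PySem.Dict.ofList
  [("2000-12-31","2001-01-01"),("2001-12-31","2002-01-01"),("2002-12-31","2003-01-01"),("2003-12-31","2004-01-01"),
   ("2004-12-31","2005-01-01"),("2005-12-31","2006-01-01"),("2006-12-31","2007-01-01"),("2007-12-31","2008-01-01"),
   ("2008-12-31","2009-01-01"),("2009-12-31","2010-01-01"),("2010-12-31","2011-01-01"),("2011-12-31","2012-01-01"),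
   ("2012-12-31","2013-01-01"),("2013-12-31","2014-01-01"),("2014-12-31","2015-01-01"),("2015-12-31","2016-01-01"),
   ("2016-12-31","2017-01-01")]

def janfebReplacements : PySem.Dict String String := PySem.Dict.ofList
  [("2017-01-02","2017-01-04"),("2017-01-09","2017-01-08"),("2017-01-16","2017-01-15"),("2017-01-23","2017-01-22"),
   ("2017-01-30","2017-01-29"),("2017-02-06","2017-02-05"),("2017-02-13","2017-02-12"),("2017-02-20","2017-02-19"),
   ("2017-02-27","2017-02-26")]

-- ===== PORT A =====
def replace_unavailable_dates (date_list : List String) : List String :=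
  let l1 := date_list.map (fun d => PySem.Str.replace d "12-17" "12-18")
  let l2 := l1.map (fun d => PySem.Str.replace d "12-24" "12-25")
  let l3 := l2.map (fun d => dec31Replacements.getD d d)
  let l4 := l3.map (fun d => janfebReplacements.getD d d)
  let l5 := l4.filter (fun d => !(PySem.Str.isIn "2018" d))
  let l6 := l5.filter (fun d => !(PySem.Str.isIn "2019" d))
  let l7 := l6.filter (fun d => !((["2017-12-18","2017-12-25","2017-12-31"] : List String).contains d))
  l7

-- ===== PORT B =====
-- Source B's fix_december: ONE left-to-right scan over the characters, rewriting
-- '12-17'->'12-18' and '12-24'->'12-25' in the same pass (the while loop over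
-- the remaining suffix = structural recursion on the char list)
def scanFix : List Char → List Char
  | '1' :: '2' :: '-' :: '1' :: '7' :: t => '1' :: '2' :: '-' :: '1' :: '8' :: scanFix t
  | '1' :: '2' :: '-' :: '2' :: '4' :: t => '1' :: '2' :: '-' :: '2' :: '5' :: scanFix t
  | c :: t => c :: scanFix t
  | [] => []

-- the body of Source B's single loop: scan, then the two dict lookups
def pvStep (d : String) : String :=
  let s := String.ofList (scanFix d.toList)
  let s2 := dec31Replacements.getD s s
  janfebReplacements.getD s2 s2

def replace_unavailable_dates_alt (date_list : List String) : List String :=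
  match date_list with
  | [] => []
  | d :: rest =>
    let s := pvStep d
    if !(PySem.Str.isIn "2018" s) && !(PySem.Str.isIn "2019" s)
        && !((["2017-12-18","2017-12-25","2017-12-31"] : List String).contains s) then
      s :: replace_unavailable_dates_alt rest
    else
      replace_unavailable_dates_alt rest

-- ===== PRECONDITION & SPEC =====
def Spec_replace_unavailable_dates (date_list : List String) (out : List String) : Prop := out = replace_unavailable_dates_alt date_list
instance (date_list : List String) (out : List String) : Decidable (Spec_replace_unavailable_dates date_list out) := by unfold Spec_replace_unavailable_dates; infer_instance

-- ===== CLAIM (what is proved, stated in full; the proofs are below) =====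
def Claim_equal_replace_unavailable_dates : Prop := ∀ (date_list : List String), Dom_replace_unavailable_dates date_list → Spec_replace_unavailable_dates date_list (replace_unavailable_dates date_list)

-- ===== LEMMAS AND PROOFS =====

-- clean structural characterisation of PySem.Chars.replace for a nonempty pattern
def repS (old new : List Char) : List Char → List Char
  | [] => []
  | c :: t =>
    if old.isPrefixOf (c :: t) then new ++ repS old new (t.drop (old.length - 1))
    else c :: repS old new t
termination_by l => l.length
decreasing_by
  · simp only [List.length_drop, List.length_cons]; omega
  · simp

theorem go_spec (old new : List Char) (hold : old ≠ []) :
    ∀ (fuel : Nat) (l acc : List Char), l.length ≤ fuel →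
      PySem.Chars.replace.go old new fuel l acc = acc.reverse ++ repS old new l := by
  intro fuel
  induction fuel with
  | zero =>
    intro l acc hl
    have : l = [] := List.eq_nil_of_length_eq_zero (Nat.le_zero.mp hl)
    subst this
    simp [PySem.Chars.replace.go, repS]
  | succ n ih =>
    intro l acc hl
    match l with
    | [] => simp [PySem.Chars.replace.go, repS]
    | c :: t =>
      rw [PySem.Chars.replace.go]
      by_cases hp : old.isPrefixOf (c :: t)
      · obtain ⟨o, os, rfl⟩ : ∃ o os, old = o :: os := by
          cases old with | nil => exact absurd rfl hold | cons o os => exact ⟨o, os, rfl⟩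
        have hdrop : List.drop (o :: os).length (c :: t) = t.drop ((o :: os).length - 1) := by
          simp
        have hlen : (List.drop (o :: os).length (c :: t)).length ≤ n := by
          simp at hl ⊢; omega
        simp only [hp, if_true]
        rw [ih _ _ hlen, repS, if_pos hp, hdrop]
        simp
      · simp only [hp, Bool.false_eq_true, if_false]
        have hlen : t.length ≤ n := by simp at hl; omega
        rw [ih _ _ hlen, repS, if_neg hp]
        simp

theorem replace_eq_repS (s old new : List Char) (hold : old ≠ []) :
    PySem.Chars.replace s old new = repS old new s := by
  rw [PySem.Chars.replace]
  have he : old.isEmpty = false := by cases old <;> simp_all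
  rw [he]
  simpa using go_spec old new hold s.length s [] le_rfl

-- relation between a char list and its image under the first rewrite:
-- characters are unchanged except a '7' may become an '8'
def pvRel (a b : Char) : Prop := b = a ∨ (a = '7' ∧ b = '8')

theorem rel_rep1 : ∀ l : List Char,
    List.Forall₂ pvRel l (repS ['1','2','-','1','7'] ['1','2','-','1','8'] l) := by
  intro l
  induction l using repS.induct (old := ['1','2','-','1','7']) with
  | case1 => simp [repS]
  | case2 c t hp ih =>
    obtain ⟨u, hu⟩ := List.isPrefixOf_iff_prefix.mp hp
    obtain ⟨rfl, rfl⟩ : c = '1' ∧ t = '2' :: '-' :: '1' :: '7' :: u := by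
      have h := hu.symm
      simp only [List.cons_append, List.nil_append, List.cons.injEq] at h
      tauto
    rw [repS, if_pos hp]
    simp only [List.length_cons] at ih ⊢
    exact .cons (Or.inl rfl) (.cons (Or.inl rfl) (.cons (Or.inl rfl)
      (.cons (Or.inl rfl) (.cons (Or.inr ⟨rfl, rfl⟩) (by simpa using ih)))))
  | case3 c t hp ih =>
    rw [repS, if_neg hp]
    exact .cons (Or.inl rfl) ih

-- a pattern containing neither '7' nor '8' matches before and after the first rewrite alike
theorem isPrefixOf_eq_of_rel : ∀ (l m : List Char), List.Forall₂ pvRel l m →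
    ∀ p : List Char, (∀ x ∈ p, x ≠ '7' ∧ x ≠ '8') → p.isPrefixOf l = p.isPrefixOf m := by
  intro l m hrel
  induction hrel with
  | nil => intro p hp; rfl
  | @cons x y l' m' hxy hrest ih =>
    intro p hp
    cases p with
    | nil => simp
    | cons a p' =>
      simp only [List.isPrefixOf]
      have ha := hp a List.mem_cons_self
      have hx : (a == x) = (a == y) := by
        rcases hxy with rfl | ⟨rfl, rfl⟩
        · rfl
        · have h1 : (a == '7') = false := by simpa using ha.1
          have h2 : (a == '8') = false := by simpa using ha.2
          rw [h1, h2]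
      rw [hx, ih p' (fun z hz => hp z (List.mem_cons_of_mem _ hz))]

-- core: the two sequential rewrites equal B's single scan
theorem rep2_rep1_eq_scanFix : ∀ s : List Char,
    repS ['1','2','-','2','4'] ['1','2','-','2','5']
      (repS ['1','2','-','1','7'] ['1','2','-','1','8'] s) = scanFix s := by
  intro s
  induction s using scanFix.induct with
  | case1 t ih =>
    rw [scanFix,
      show repS ['1','2','-','1','7'] ['1','2','-','1','8'] ('1' :: '2' :: '-' :: '1' :: '7' :: t)
        = '1' :: '2' :: '-' :: '1' :: '8' :: repS ['1','2','-','1','7'] ['1','2','-','1','8'] t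
      from by rw [repS]; simp [List.isPrefixOf],
      show ∀ X, repS ['1','2','-','2','4'] ['1','2','-','2','5'] ('1' :: '2' :: '-' :: '1' :: '8' :: X)
        = '1' :: '2' :: '-' :: '1' :: '8' :: repS ['1','2','-','2','4'] ['1','2','-','2','5'] X
      from fun X => by
        rw [repS]; simp only [List.isPrefixOf]
        rw [repS]; simp only [List.isPrefixOf]
        rw [repS]; simp only [List.isPrefixOf]
        rw [repS]; simp only [List.isPrefixOf]
        rw [repS]; simp only [List.isPrefixOf]
        simp,
      ih]
  | case2 t ih =>
    rw [scanFix,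
      show repS ['1','2','-','1','7'] ['1','2','-','1','8'] ('1' :: '2' :: '-' :: '2' :: '4' :: t)
        = '1' :: '2' :: '-' :: '2' :: '4' :: repS ['1','2','-','1','7'] ['1','2','-','1','8'] t
      from by
        rw [repS]; simp only [List.isPrefixOf]
        rw [repS]; simp only [List.isPrefixOf]
        rw [repS]; simp only [List.isPrefixOf]
        rw [repS]; simp only [List.isPrefixOf]
        rw [repS]; simp only [List.isPrefixOf]
        simp,
      show repS ['1','2','-','2','4'] ['1','2','-','2','5']
          ('1' :: '2' :: '-' :: '2' :: '4' :: repS ['1','2','-','1','7'] ['1','2','-','1','8'] t)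
        = '1' :: '2' :: '-' :: '2' :: '5' :: repS ['1','2','-','2','4'] ['1','2','-','2','5']
          (repS ['1','2','-','1','7'] ['1','2','-','1','8'] t)
      from by rw [repS]; simp [List.isPrefixOf],
      ih]
  | case3 c t h1 h2 ih =>
    have hp1 : ¬ (['1','2','-','1','7'] : List Char).isPrefixOf (c :: t) = true := by
      intro h
      obtain ⟨u, hu⟩ := List.isPrefixOf_iff_prefix.mp h
      obtain ⟨rfl, rfl⟩ : c = '1' ∧ t = '2' :: '-' :: '1' :: '7' :: u := by
        have h' := hu.symm
        simp only [List.cons_append, List.nil_append, List.cons.injEq] at h'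
        tauto
      exact h1 u rfl rfl
    have hp2 : ¬ (['1','2','-','2','4'] : List Char).isPrefixOf (c :: t) = true := by
      intro h
      obtain ⟨u, hu⟩ := List.isPrefixOf_iff_prefix.mp h
      obtain ⟨rfl, rfl⟩ : c = '1' ∧ t = '2' :: '-' :: '2' :: '4' :: u := by
        have h' := hu.symm
        simp only [List.cons_append, List.nil_append, List.cons.injEq] at h'
        tauto
      exact h2 u rfl rfl
    have hpref : (['1','2','-','2','4'] : List Char).isPrefixOf
        (c :: repS ['1','2','-','1','7'] ['1','2','-','1','8'] t)
        = (['1','2','-','2','4'] : List Char).isPrefixOf (c :: t) :=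
      (isPrefixOf_eq_of_rel _ _ (.cons (Or.inl rfl) (rel_rep1 t)) _
        (by intro x hx; fin_cases hx <;> exact ⟨by decide, by decide⟩)).symm
    rw [scanFix.eq_3 c t h1 h2,
      show repS ['1','2','-','1','7'] ['1','2','-','1','8'] (c :: t)
        = c :: repS ['1','2','-','1','7'] ['1','2','-','1','8'] t from by rw [repS, if_neg hp1]]
    rw [repS, hpref, if_neg hp2, ih]
  | case4 => simp [repS, scanFix]

theorem replace_replace_eq_scanFix (d : String) :
    PySem.Str.replace (PySem.Str.replace d "12-17" "12-18") "12-24" "12-25"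
      = String.ofList (scanFix d.toList) := by
  apply String.toList_inj.mp
  simp only [PySem.Str.toList_replace, String.toList_ofList]
  rw [replace_eq_repS _ _ _ (by decide), replace_eq_repS _ _ _ (by decide),
    show ("12-17" : String).toList = ['1','2','-','1','7'] from rfl,
    show ("12-18" : String).toList = ['1','2','-','1','8'] from rfl,
    show ("12-24" : String).toList = ['1','2','-','2','4'] from rfl,
    show ("12-25" : String).toList = ['1','2','-','2','5'] from rfl]
  exact rep2_rep1_eq_scanFix d.toList

theorem filter3_cons {α : Type} (p1 p2 p3 : α → Bool) (x : α) (l : List α) :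
    (((x :: l).filter p1).filter p2).filter p3 =
      if p1 x && p2 x && p3 x then x :: ((l.filter p1).filter p2).filter p3
      else ((l.filter p1).filter p2).filter p3 := by
  simp only [List.filter_cons]
  by_cases h1 : p1 x <;> by_cases h2 : p2 x <;> by_cases h3 : p3 x <;>
    simp [h1, h2, h3]

theorem A_cons (d : String) (rest : List String) :
    replace_unavailable_dates (d :: rest) =
      if !(PySem.Str.isIn "2018" (pvStep d)) && !(PySem.Str.isIn "2019" (pvStep d))
          && !((["2017-12-18","2017-12-25","2017-12-31"] : List String).contains (pvStep d)) then
        pvStep d :: replace_unavailable_dates rest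
      else replace_unavailable_dates rest := by
  have hstep : janfebReplacements.getD
      (dec31Replacements.getD
        (PySem.Str.replace (PySem.Str.replace d "12-17" "12-18") "12-24" "12-25")
        (PySem.Str.replace (PySem.Str.replace d "12-17" "12-18") "12-24" "12-25"))
      (dec31Replacements.getD
        (PySem.Str.replace (PySem.Str.replace d "12-17" "12-18") "12-24" "12-25")
        (PySem.Str.replace (PySem.Str.replace d "12-17" "12-18") "12-24" "12-25")) = pvStep d := by
    rw [replace_replace_eq_scanFix]; rfl
  simp only [replace_unavailable_dates, List.map_cons]
  rw [filter3_cons]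
  rw [hstep]

theorem replace_eq_alt (l : List String) :
    replace_unavailable_dates l = replace_unavailable_dates_alt l := by
  induction l with
  | nil => rfl
  | cons d rest ih =>
    rw [A_cons, ih]
    rfl

-- ===== VERDICT (by name: the statement is the Claim_ definition above) =====
theorem replace_unavailable_dates_spec : Claim_equal_replace_unavailable_dates := by
  intro l _
  unfold Spec_replace_unavailable_dates
  exact replace_eq_alt l
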